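-- pv_equiv track=rewrite | github.com/kkw-11/Problem_Solving | Programmers/기능개발_0221.py | solution
-- ===== SOURCE A (Python) =====
-- import math
--
-- def solution(progresses, speeds):
--     answer = []
--
--     remain_day = []
--     distribution = []
--     for index, progress in enumerate(progresses):
--         remain_day.append(math.ceil((100-progress)/speeds[index]))
--
--     for day in remain_day:
--         if len(distribution) == 0:
--             distribution.append(day)
--         elif len(distribution) != 0 and distribution[0] >= day:
--             distribution.append(day)
--         elif len(distribution) != 0 and distribution[0] < day:
--             answer.append(len(distribution))
--             distribution = []
--             distribution.append(day)
--
--     if len(distribution):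
--         answer.append((len(distribution)))
--
--
--     return answer
-- ===== SOURCE B (Python) =====
-- import math
--
-- def solution(progresses, speeds):
--     remain = [math.ceil((100 - p) / s) for p, s in zip(progresses, speeds)]
--     # running prefix maximum of the deadlines
--     peaks = []
--     for d in remain:
--         peaks.append(d if not peaks or d > peaks[-1] else peaks[-1])
--     # the prefix-max sequence is nondecreasing, so equal values are contiguous:
--     # each deployment group is one distinct prefix-max value; count them per value.
--     counts = {}
--     for v in peaks:
--         counts[v] = counts.get(v, 0) + 1
--     return list(counts.values())
-- ===== Notes on version B (the rewrite author's own statement) =====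
-- stated objective: alternative
-- what changed: Instead of maintaining a growing per-group 'distribution' buffer and flushing it on each larger deadline, B computes the prefix-maximum sequence of the deadlines and then counts the multiplicity of each distinct prefix-max value with a dictionary; the group sizes are exactly those counts in first-occurrence order.
import Mathlib
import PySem

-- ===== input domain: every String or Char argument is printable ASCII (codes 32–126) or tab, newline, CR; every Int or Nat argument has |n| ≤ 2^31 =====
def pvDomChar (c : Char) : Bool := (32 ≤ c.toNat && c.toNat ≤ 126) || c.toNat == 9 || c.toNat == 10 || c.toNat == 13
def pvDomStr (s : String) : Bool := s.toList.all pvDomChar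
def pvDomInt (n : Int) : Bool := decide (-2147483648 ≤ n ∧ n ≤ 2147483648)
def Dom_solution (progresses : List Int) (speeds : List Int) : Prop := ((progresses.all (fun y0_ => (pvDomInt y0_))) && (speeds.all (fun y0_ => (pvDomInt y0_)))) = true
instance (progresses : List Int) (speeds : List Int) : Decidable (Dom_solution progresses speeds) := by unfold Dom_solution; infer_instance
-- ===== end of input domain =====

-- B replaces A's grouped "distribution" buffer by a prefix-maximum pass plus a dict count of each distinct prefix-max value (alternative decomposition, same cost).


-- ===== PORT A =====
-- math.ceil((100-p)/s): on Dom the float quotient has |numerator| ≤ 2^31+100 < 2^53, so the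
-- float ceil equals the exact rational ceiling; ceil(a/b) = -((-a) // b) with Python floor division (exact here).
def pyCeilDiv (a b : Int) : Int := -(PySem.Int.floordiv (-a) b)

-- loop body of A's second 'for day in remain_day' loop, branch for branch
def stepA (st : List Int × List Int) (day : Int) : List Int × List Int :=
  if st.2.length = 0 then (st.1, st.2 ++ [day])
  else if st.2.length ≠ 0 ∧ PySem.List.pyGetD st.2 0 0 ≥ day then (st.1, st.2 ++ [day])
  else if st.2.length ≠ 0 ∧ PySem.List.pyGetD st.2 0 0 < day then
    (st.1 ++ [(st.2.length : Int)], ([] : List Int) ++ [day])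
  else st

def solution (progresses : List Int) (speeds : List Int) : List Int :=
  -- speeds[index]: in range on Pre_, so pyGetD is exact there
  let remain_day := (PySem.List.enumerate progresses).foldl
    (fun acc ip => acc ++ [pyCeilDiv (100 - ip.2) (PySem.List.pyGetD speeds ip.1 0)]) []
  let st := remain_day.foldl stepA ([], [])
  if st.2.length ≠ 0 then st.1 ++ [(st.2.length : Int)] else st.1

-- ===== PORT B =====
-- loop body of B's prefix-maximum loop; peaks[-1] is only read when peaks is nonempty
-- (Python's short-circuit 'not peaks or …'), so pyGetD's default is never the value used
def stepPeak (pk : List Int) (d : Int) : List Int :=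
  pk ++ [if pk = [] ∨ d > PySem.List.pyGetD pk (-1) 0 then d else PySem.List.pyGetD pk (-1) 0]

def solution_alt (progresses : List Int) (speeds : List Int) : List Int :=
  let remain := (progresses.zip speeds).map (fun ps => pyCeilDiv (100 - ps.1) ps.2)
  let peaks := remain.foldl stepPeak []
  -- counts[v] = counts.get(v, 0) + 1 over peaks, then list(counts.values())
  let counts := peaks.foldl (fun d v => d.insert v (d.getD v 0 + 1)) PySem.Dict.empty
  counts.values

-- ===== PRECONDITION & SPEC =====
-- Pre_ excludes exactly the inputs where A raises: IndexError when progresses is longer than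
-- speeds, ZeroDivisionError when a used speed is zero.
def Pre_solution (progresses : List Int) (speeds : List Int) : Prop :=
  progresses.length ≤ speeds.length ∧ ¬ (0 ∈ speeds.take progresses.length)
instance (progresses : List Int) (speeds : List Int) : Decidable (Pre_solution progresses speeds) := by unfold Pre_solution; infer_instance
def pvWitness_solution : List Int × List Int := ([50, 90, 30], [25, 5, 70])

def Spec_solution (progresses : List Int) (speeds : List Int) (out : List Int) : Prop := out = solution_alt progresses speeds
instance (progresses : List Int) (speeds : List Int) (out : List Int) : Decidable (Spec_solution progresses speeds out) := by unfold Spec_solution; infer_instance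

-- ===== CLAIM (what is proved, stated in full; the proofs are below) =====
def Claim_equal_solution : Prop := ∀ (progresses : List Int) (speeds : List Int), Dom_solution progresses speeds → Pre_solution progresses speeds → Spec_solution progresses speeds (solution progresses speeds)

-- ===== LEMMAS AND PROOFS =====

-- A's remain_day list equals B's remain list under Pre_
lemma remain_aux (f : Int → Int → Int) (ps : List Int) :
    ∀ (ss : List Int) (k : Nat), k + ps.length ≤ ss.length →
    (PySem.List.enumerate ps (k : Int)).map (fun ip => f ip.2 (PySem.List.pyGetD ss ip.1 0))
      = (ps.zip (ss.drop k)).map (fun ab => f ab.1 ab.2) := by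
  induction ps with
  | nil => intro ss k h; simp [PySem.List.enumerate_nil]
  | cons p t ih =>
    intro ss k h
    have hk : k < ss.length := by simp at h; omega
    have hdrop : ss.drop k = ss[k] :: ss.drop (k + 1) := (List.getElem_cons_drop hk).symm
    rw [PySem.List.enumerate_cons, hdrop]
    simp only [List.zip_cons_cons, List.map_cons]
    congr 1
    · simp [PySem.List.pyGetD_natCast, List.getD_eq_getElem?_getD, hk]
    · have := ih ss (k + 1) (by simp at h ⊢; omega)
      rw [show ((k : Int) + 1) = ((k + 1 : Nat) : Int) by push_cast; ring]
      exact this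

-- counting in L ++ [x] over keys other than x is counting in L
lemma map_count_append_of_not_mem (L : List Int) (x : Int) (ks : List Int)
    (h : ∀ k ∈ ks, k ≠ x) :
    ks.map (fun k => ((L ++ [x]).count k : Int)) = ks.map (fun k => (L.count k : Int)) := by
  refine List.map_congr_left (fun k hk => ?_)
  have hz : List.count k [x] = 0 := List.count_eq_zero.2 (by simpa using h k hk)
  rw [List.count_append, hz]; simp

-- the joint invariant of A's grouping fold and B's prefix-max fold:
-- the distinct prefix-max values, each with its multiplicity, are exactly
-- A's flushed group sizes followed by the current group's size
lemma inv (R : List Int) :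
    (R.foldl stepA ([], []) = ([], []) ∧ R.foldl stepPeak [] = []) ∨
    (∃ front m,
      PySem.Set.ofList (R.foldl stepPeak []) = front ++ [m] ∧
      (∀ k ∈ front, k < m) ∧
      (∀ x ∈ R.foldl stepPeak [], x ≤ m) ∧
      front.map (fun k => ((R.foldl stepPeak []).count k : Int)) = (R.foldl stepA ([], [])).1 ∧
      (((R.foldl stepPeak []).count m : Int)) = ((R.foldl stepA ([], [])).2.length : Int) ∧
      (R.foldl stepA ([], [])).2.head? = some m ∧
      (∃ pk0, R.foldl stepPeak [] = pk0 ++ [m])) := by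
  induction R using List.reverseRecOn with
  | nil => left; exact ⟨rfl, rfl⟩
  | append_singleton R d ih =>
    right
    rw [List.foldl_append, List.foldl_append]
    simp only [List.foldl_cons, List.foldl_nil]
    rcases ih with ⟨hA, hP⟩ | ⟨front, m, hof, hlt, hle, hmap, hcnt, hhd, pk0, hpk⟩
    · rw [hA, hP]
      have hA' : stepA ([], []) d = ([], [d]) := by simp [stepA]
      have hP' : stepPeak [] d = [d] := by simp [stepPeak]
      rw [hA', hP']
      exact ⟨[], d, by simp [PySem.Set.ofList], by simp, by simp, by simp, by simp, by simp,
        [], by simp⟩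
    · set A := R.foldl stepA ([], []) with hAdef
      set pk := R.foldl stepPeak [] with hPdef
      obtain ⟨t, hdist⟩ : ∃ t, A.2 = m :: t := by
        cases hA2 : A.2 with
        | nil => rw [hA2] at hhd; simp at hhd
        | cons a b => rw [hA2] at hhd; simp at hhd; exact ⟨b, by rw [hhd]⟩
      have hlast : PySem.List.pyGetD pk (-1) 0 = m := by
        rw [hpk]; exact PySem.List.pyGetD_neg_one_append_singleton pk0 m 0
      have hpkne : pk ≠ [] := by rw [hpk]; simp
      by_cases hge : m ≥ d
      · -- d ≤ running max: A appends to the group, B's prefix max repeats m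
        have hsA : stepA A d = (A.1, A.2 ++ [d]) := by
          simp [stepA, hdist, hge]
        have hsP : stepPeak pk d = pk ++ [m] := by
          unfold stepPeak
          rw [hlast, if_neg (by push Not; exact ⟨hpkne, by omega⟩)]
        rw [hsA, hsP]
        have hmem : m ∈ pk := by rw [hpk]; simp
        refine ⟨front, m, ?_, hlt, ?_, ?_, ?_, by simp [hdist], pk, rfl⟩
        · rw [PySem.Set.ofList_append_singleton,
            PySem.Set.add_of_mem (by rw [PySem.Set.mem_ofList]; exact hmem), hof]
        · intro x hx
          rcases List.mem_append.1 hx with hx | hx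
          · exact hle x hx
          · simp at hx; omega
        · rw [← hmap]
          exact map_count_append_of_not_mem pk m front (fun k hk => by have := hlt k hk; omega)
        · have h1 : (pk ++ [m]).count m = pk.count m + 1 := by simp [List.count_append]
          have h2 : (A.2 ++ [d]).length = A.2.length + 1 := by simp
          rw [h1, h2]; push_cast; omega
      · -- d exceeds the running max: A flushes the group, B's prefix max rises to d
        have hmlt : m < d := by omega
        have hsA : stepA A d = (A.1 ++ [(A.2.length : Int)], ([] : List Int) ++ [d]) := by
          simp only [stepA, hdist]
          rw [if_neg (by simp), if_neg (by push Not; intro _; rw [PySem.List.pyGetD_zero_cons]; omega),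
            if_pos ⟨by simp, by rw [PySem.List.pyGetD_zero_cons]; omega⟩]
        have hsP : stepPeak pk d = pk ++ [d] := by
          unfold stepPeak
          rw [hlast, if_pos (Or.inr hmlt)]
        rw [hsA, hsP]
        have hdnot : d ∉ pk := fun hmem => absurd (hle d hmem) (by omega)
        refine ⟨front ++ [m], d, ?_, ?_, ?_, ?_, ?_, by simp, pk, rfl⟩
        · rw [PySem.Set.ofList_append_singleton,
            PySem.Set.add_of_not_mem (by rw [PySem.Set.mem_ofList]; exact hdnot), hof]
        · intro k hk
          rcases List.mem_append.1 hk with hk | hk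
          · have := hlt k hk; omega
          · simp at hk; omega
        · intro x hx
          rcases List.mem_append.1 hx with hx | hx
          · have := hle x hx; omega
          · simp at hx; omega
        · have hne' : ∀ k ∈ front ++ [m], k ≠ d := by
            intro k hk
            rcases List.mem_append.1 hk with hk | hk
            · have := hlt k hk; omega
            · simp at hk; omega
          calc (front ++ [m]).map (fun k => ((pk ++ [d]).count k : Int))
              = (front ++ [m]).map (fun k => (pk.count k : Int)) :=
                map_count_append_of_not_mem pk d _ hne'
            _ = front.map (fun k => (pk.count k : Int)) ++ [(pk.count m : Int)] := by simp
            _ = A.1 ++ [(A.2.length : Int)] := by rw [hmap, hcnt]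
        · have h1 : (pk ++ [d]).count d = pk.count d + 1 := by simp [List.count_append]
          rw [h1, List.count_eq_zero.2 hdnot]
          simp
        
-- compose both ports down to the invariant over the shared remain list
lemma ports_eq (R : List Int) :
    (let st := R.foldl stepA ([], []);
     if st.2.length ≠ 0 then st.1 ++ [(st.2.length : Int)] else st.1)
    = (let counts := (R.foldl stepPeak []).foldl
         (fun d v => d.insert v (d.getD v 0 + 1)) PySem.Dict.empty;
       counts.values) := by
  rw [PySem.Dict.foldl_insert_getD_add_one_eq_counter]
  have hv : (PySem.Dict.counter (R.foldl stepPeak [])).values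
      = (PySem.Set.ofList (R.foldl stepPeak [])).map
          (fun k => (((R.foldl stepPeak []).count k : Nat) : Int)) := by
    show (PySem.Dict.counter (R.foldl stepPeak [])).items.map (·.2) = _
    rw [PySem.Dict.items_counter, List.map_map]
    rfl
  rcases inv R with ⟨hA, hP⟩ | ⟨front, m, hof, _, _, hmap, hcnt, hhd, _⟩
  · rw [hA, hP]
    rfl
  · simp only [hv, hof, List.map_append, hmap, List.map_singleton, hcnt]
    have hne : (R.foldl stepA ([], [])).2.length ≠ 0 := by
      cases h : (R.foldl stepA ([], [])).2 with
      | nil => rw [h] at hhd; simp at hhd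
      | cons a _ => simp
    rw [if_pos (by simpa using hne)]
-- ===== VERDICT (by name: the statement is the Claim_ definition above) =====
theorem solution_spec : Claim_equal_solution := by
  intro progresses speeds _ hpre
  rcases hpre with ⟨hlen, _⟩
  have hremain := remain_aux (fun a b => pyCeilDiv (100 - a) b) progresses speeds 0 (by omega)
  simp only [Nat.cast_zero, List.drop_zero] at hremain
  unfold Spec_solution
  simp only [solution, solution_alt]
  rw [PySem.List.foldl_append_singleton_eq_map, List.nil_append, hremain]
  exact ports_eq _
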